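-- pv_equiv track=rewrite | github.com/quocanh34/soict-SLU | norm-tuned/utils.py | split_chunk_input
-- ===== SOURCE A (Python) =====
-- def split_chunk_input(raw_text, chunk_size):
--     input_words = raw_text.strip().split()
--     clean_data = [input_words[i:i + chunk_size] for i in range(0, len(input_words), chunk_size)]
--     if len(clean_data) > 1:
--         clean_data = [" ".join(clean_data[i] + clean_data[i + 1]) for i in range(len(clean_data) - 1)]
--     else:
--         clean_data = [" ".join(clean_data[0])]
--     return clean_data
-- ===== SOURCE B (Python) =====
-- def split_chunk_input(raw_text, chunk_size):
--     words = raw_text.strip().split()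
--     pairs = []
--     ws = words
--     while len(ws) > chunk_size:
--         pairs.append(" ".join(ws[:2 * chunk_size]))
--         ws = ws[chunk_size:]
--     return pairs if pairs else [" ".join(words)]
-- ===== Notes on version B (the rewrite author's own statement) =====
-- stated objective: alternative
-- what changed: B replaces A's two staged index-based passes (build the list of chunks via range/slicing, then join adjacent chunk pairs by index) with a single while loop that consumes the word list itself: each iteration appends the join of the first 2*chunk_size words and drops the first chunk, so no chunk list, chunk count or index arithmetic is ever formed.
import Mathlib
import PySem

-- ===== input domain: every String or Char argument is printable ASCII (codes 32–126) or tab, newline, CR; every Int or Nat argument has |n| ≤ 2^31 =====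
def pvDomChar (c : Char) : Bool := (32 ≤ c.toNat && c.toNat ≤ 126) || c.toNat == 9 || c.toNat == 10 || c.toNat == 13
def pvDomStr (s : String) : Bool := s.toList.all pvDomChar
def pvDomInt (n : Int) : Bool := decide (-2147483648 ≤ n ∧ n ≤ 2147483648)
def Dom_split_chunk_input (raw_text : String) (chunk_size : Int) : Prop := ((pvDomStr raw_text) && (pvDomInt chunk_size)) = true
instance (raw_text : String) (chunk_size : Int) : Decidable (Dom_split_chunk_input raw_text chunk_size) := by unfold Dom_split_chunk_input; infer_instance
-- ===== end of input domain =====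

-- B replaces A's two staged index passes (chunk list, then pairwise join) by one structural
-- recursion consuming the word list; objective: alternative decomposition, same cost.

-- ===== PORT A =====
def split_chunk_input (raw_text : String) (chunk_size : Int) : List String :=
  let input_words := PySem.Str.split₀ (PySem.Str.strip raw_text)
  let clean_data := (PySem.List.pyRange 0 (input_words.length : Int) chunk_size).map
      (fun i => PySem.List.slice input_words (some i) (some (i + chunk_size)))
  if clean_data.length > 1 then
    (List.range (clean_data.length - 1)).map
      (fun i => PySem.Str.join " " (clean_data.getD i [] ++ clean_data.getD (i + 1) []))
  else
    [PySem.Str.join " " (clean_data.getD 0 [])]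

-- ===== PORT B =====
-- Python's while loop has no syntactic bound; the port runs it on fuel = length of the word
-- list, which is exact whenever the loop finishes within that many iterations — in
-- particular on all of Pre_ (chunk_size ≥ 1), where each iteration strictly shortens ws.
def pvEmit (chunk_size : Int) : Nat → List String → List String → List String
  | 0, _, pairs => pairs
  | fuel + 1, ws, pairs =>
    if (ws.length : Int) ≤ chunk_size then pairs
    else pvEmit chunk_size fuel (PySem.List.slice ws (some chunk_size) none)
          (pairs ++ [PySem.Str.join " " (PySem.List.slice ws none (some (2 * chunk_size)))])

def split_chunk_input_alt (raw_text : String) (chunk_size : Int) : List String :=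
  let words := PySem.Str.split₀ (PySem.Str.strip raw_text)
  let pairs := pvEmit chunk_size words.length words []
  if pairs = [] then [PySem.Str.join " " words] else pairs

-- ===== PRECONDITION & SPEC =====
-- Pre_ excludes exactly the inputs where the Python A raises: chunk_size ≤ 0 (ValueError from
-- range step 0, or IndexError since a nonpositive step yields no chunks) and whitespace-only /
-- empty raw_text (IndexError on clean_data[0]).
def Pre_split_chunk_input (raw_text : String) (chunk_size : Int) : Prop :=
  0 < chunk_size ∧ PySem.Str.split₀ (PySem.Str.strip raw_text) ≠ []
instance (raw_text : String) (chunk_size : Int) : Decidable (Pre_split_chunk_input raw_text chunk_size) := by unfold Pre_split_chunk_input; infer_instance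
def pvWitness_split_chunk_input : String × Int := ("hello brave new world", 2)

def Spec_split_chunk_input (raw_text : String) (chunk_size : Int) (out : List String) : Prop := out = split_chunk_input_alt raw_text chunk_size
instance (raw_text : String) (chunk_size : Int) (out : List String) : Decidable (Spec_split_chunk_input raw_text chunk_size out) := by unfold Spec_split_chunk_input; infer_instance

-- ===== CLAIM (what is proved, stated in full; the proofs are below) =====
def Claim_equal_split_chunk_input : Prop := ∀ (raw_text : String) (chunk_size : Int), Dom_split_chunk_input raw_text chunk_size → Pre_split_chunk_input raw_text chunk_size → Spec_split_chunk_input raw_text chunk_size (split_chunk_input raw_text chunk_size)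

-- ===== LEMMAS AND PROOFS =====

-- Common normal form both ports are reduced to.
def pvF (w : List String) (c : Nat) : List String :=
  if w.length ≤ c then [PySem.Str.join " " w]
  else (List.range ((w.length + c - 1) / c - 1)).map
        (fun i => PySem.Str.join " " ((w.drop (i * c)).take (2 * c)))

theorem pvEmit_spec (c : Int) (hc : 0 < c) :
    ∀ (f : Nat) (w : List String) (acc : List String), w.length ≤ f →
      pvEmit c f w acc = acc ++
        (List.range (if w.length ≤ c.toNat then 0 else (w.length + c.toNat - 1) / c.toNat - 1)).map
          (fun i => PySem.Str.join " " ((w.drop (i * c.toNat)).take (2 * c.toNat))) := by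
  intro f
  induction f with
  | zero =>
    intro w acc hw
    have h0 : w.length = 0 := by omega
    simp [pvEmit, h0]
  | succ f ih =>
    intro w acc hw
    set c' := c.toNat with hc'
    have hc'1 : 1 ≤ c' := by omega
    set n := w.length with hn
    by_cases hle : (n : Int) ≤ c
    · have h' : n ≤ c' := by omega
      simp [pvEmit, ← hn, hle, h']
    · have hngt : c' < n := by omega
      have hslice2 : PySem.List.slice w none (some (2 * c)) = w.take (2 * c') := by
        rw [PySem.List.slice_to w (by omega)]; congr 1; omega
      have hslicef : PySem.List.slice w (some c) none = w.drop c' := by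
        rw [PySem.List.slice_from w hc.le]
      rw [show pvEmit c (f + 1) w acc =
            (if (w.length : Int) ≤ c then acc else
              pvEmit c f (PySem.List.slice w (some c) none)
                (acc ++ [PySem.Str.join " " (PySem.List.slice w none (some (2 * c)))])) from rfl]
      rw [if_neg (by rw [← hn]; exact hle), hslice2, hslicef]
      rw [ih (w.drop c') _ (by simp [← hn]; omega)]
      have hlen : (w.drop c').length = n - c' := by simp [← hn]
      rw [hlen]
      have hq := Nat.div_add_mod (n + c' - 1) c'
      have hr := Nat.mod_lt (n + c' - 1) (by omega : 0 < c')
      set q := (n + c' - 1) / c' with hqd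
      have hq2 : 2 ≤ q := by
        by_contra h
        have hcq : c' * q ≤ c' := by
          calc c' * q ≤ c' * 1 := Nat.mul_le_mul_left _ (by omega)
            _ = c' := Nat.mul_one _
        omega
      have hKval : (if n - c' ≤ c' then 0 else (n - c' + c' - 1) / c' - 1) = q - 2 := by
        by_cases h2 : n - c' ≤ c'
        · have hq3 : q < 3 := by
            by_contra h3
            have hcq : c' * 3 ≤ c' * q := Nat.mul_le_mul_left _ (by omega)
            omega
          simp [h2]; omega
        · have e1 : n - c' + c' - 1 = n - 1 := by omega
          have e2 : n + c' - 1 = (n - 1) + c' := by omega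
          rw [if_neg h2, e1, hqd, e2, Nat.add_div_right _ (by omega)]
          omega
      rw [hKval, if_neg (show ¬ n ≤ c' by omega),
          show q - 1 = (q - 2) + 1 by omega,
          List.range_succ_eq_map, List.map_cons, List.map_map,
          List.append_assoc, List.singleton_append]
      congr 2
      · simp
      · apply List.map_congr_left
        intro i _
        simp only [Function.comp, Nat.succ_eq_add_one]
        rw [List.drop_drop]
        congr 2
        ring_nf

theorem alt_eq_pvF (raw_text : String) (chunk_size : Int) (hc : 0 < chunk_size)
    (hw : PySem.Str.split₀ (PySem.Str.strip raw_text) ≠ []) :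
    split_chunk_input_alt raw_text chunk_size
      = pvF (PySem.Str.split₀ (PySem.Str.strip raw_text)) chunk_size.toNat := by
  unfold split_chunk_input_alt pvF
  dsimp only []
  set w := PySem.Str.split₀ (PySem.Str.strip raw_text) with hwd
  rw [pvEmit_spec chunk_size hc w.length w [] le_rfl, List.nil_append]
  have hc'1 : 1 ≤ chunk_size.toNat := by omega
  by_cases h : w.length ≤ chunk_size.toNat
  · have h0 : (if w.length ≤ chunk_size.toNat then 0
        else (w.length + chunk_size.toNat - 1) / chunk_size.toNat - 1) = 0 := if_pos h
    rw [h0, List.range_zero, List.map_nil, if_pos rfl, if_pos h]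
  · have hn : 0 < w.length := List.length_pos_of_ne_nil hw
    have hq2 : 2 ≤ (w.length + chunk_size.toNat - 1) / chunk_size.toNat := by
      have hq := Nat.div_add_mod (w.length + chunk_size.toNat - 1) chunk_size.toNat
      have hr := Nat.mod_lt (w.length + chunk_size.toNat - 1) (show 0 < chunk_size.toNat by omega)
      by_contra h2
      have hcq : chunk_size.toNat * ((w.length + chunk_size.toNat - 1) / chunk_size.toNat)
          ≤ chunk_size.toNat := by
        calc chunk_size.toNat * ((w.length + chunk_size.toNat - 1) / chunk_size.toNat)
            ≤ chunk_size.toNat * 1 := Nat.mul_le_mul_left _ (by omega)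
          _ = chunk_size.toNat := Nat.mul_one _
      omega
    rw [if_neg h, if_neg h, if_neg]
    simp only [List.map_eq_nil_iff, List.range_eq_nil]
    omega

theorem a_eq_pvF (raw_text : String) (chunk_size : Int) (hc : 0 < chunk_size)
    (hw : PySem.Str.split₀ (PySem.Str.strip raw_text) ≠ []) :
    split_chunk_input raw_text chunk_size
      = pvF (PySem.Str.split₀ (PySem.Str.strip raw_text)) chunk_size.toNat := by
  unfold split_chunk_input pvF
  dsimp only []
  set w := PySem.Str.split₀ (PySem.Str.strip raw_text) with hwdef
  have hn : 0 < w.length := List.length_pos_of_ne_nil hw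
  set c := chunk_size with hcdef
  set n : Int := (w.length : Int) with hndef
  have hn' : 0 < n := by omega
  set q : Int := (n + c - 1) / c with hqdef
  have hdm := Int.mul_ediv_add_emod (n + c - 1) c
  have hr0 : 0 ≤ (n + c - 1) % c := Int.emod_nonneg _ (by omega)
  have hr1 : (n + c - 1) % c < c := Int.emod_lt_of_pos _ hc
  have hq1 : q * c ≤ n + c - 1 := by nlinarith
  have hq2 : n + c - 1 < (q + 1) * c := by nlinarith
  have hqpos : 1 ≤ q := by nlinarith
  have hqnat : q.toNat = (w.length + c.toNat - 1) / c.toNat := by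
    have hcast : ((w.length + c.toNat - 1 : Nat) : Int) = n + c - 1 := by
      omega
    have : (((w.length + c.toNat - 1) / c.toNat : Nat) : Int) = q := by
      rw [Int.natCast_div, hcast, hqdef, Int.toNat_of_nonneg hc.le]
    omega
  clear_value w c n q
  have hrange : PySem.List.pyRange 0 n c = (List.range q.toNat).map (fun (k : Nat) => c * (k : Int)) := by
    rw [PySem.List.pyRange_of_pos 0 n hc, if_pos hn']
    simp only [zero_add, sub_zero]
    rw [hqdef]
  rw [hrange, List.map_map]
  have hchunk : ∀ k : Nat, ((fun i => PySem.List.slice w (some i) (some (i + c))) ∘ fun k : Nat => c * (k : Int)) k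
      = List.take c.toNat (List.drop (c * (k : Int)).toNat w) := by
    intro k
    have ha : 0 ≤ c * (k : Int) := by positivity
    simp only [Function.comp]
    rw [PySem.List.slice_toNat w ha (by omega)]
    congr 1
    omega
  simp only [List.length_map, List.length_range]
  by_cases hql : q ≤ 1
  · have hq1' : q = 1 := le_antisymm hql hqpos
    have hnc : w.length ≤ c.toNat := by
      have : n ≤ c := by nlinarith
      omega
    rw [if_neg (by omega), if_pos hnc]
    have h0 : (0 : Nat) < q.toNat := by omega
    rw [List.getD_eq_getElem _ _ (by simpa using h0)]
    simp only [List.getElem_map, List.getElem_range]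
    rw [hchunk 0, List.take_of_length_le (by simpa using hnc)]
    simp
  · have hnc : ¬ (w.length ≤ c.toNat) := by
      intro hle
      have : n ≤ c := by omega
      nlinarith
    rw [if_pos (by omega), if_neg hnc]
    have hlen : q.toNat - 1 = (w.length + c.toNat - 1) / c.toNat - 1 := by omega
    rw [hlen]
    apply List.map_congr_left
    intro i hi
    have hi' : i < (w.length + c.toNat - 1) / c.toNat - 1 := List.mem_range.mp hi
    have hgi : ∀ j : Nat, j < q.toNat →
        (((List.range q.toNat).map ((fun i => PySem.List.slice w (some i) (some (i + c))) ∘ fun k : Nat => c * (k : Int))).getD j [])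
        = List.take c.toNat (List.drop (c * (j : Int)).toNat w) := by
      intro j hj
      rw [List.getD_eq_getElem _ _ (by simpa using hj)]
      simp only [List.getElem_map, List.getElem_range]
      exact hchunk j
    rw [hgi i (by omega), hgi (i + 1) (by omega)]
    have hmul : ∀ j : Nat, (c * (j : Int)).toNat = j * c.toNat := by
      intro j
      have hcast : c * (j : Int) = ((j * c.toNat : Nat) : Int) := by
        push_cast [Int.toNat_of_nonneg hc.le]; ring
      omega
    rw [hmul i, hmul (i + 1), show (i + 1) * c.toNat = i * c.toNat + c.toNat by ring,
        ← List.drop_drop, ← List.take_add,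
        show c.toNat + c.toNat = 2 * c.toNat by ring]

-- ===== VERDICT (by name: the statement is the Claim_ definition above) =====
theorem split_chunk_input_spec : Claim_equal_split_chunk_input := by
  intro raw_text chunk_size _ hpre
  obtain ⟨hc, hw⟩ := hpre
  unfold Spec_split_chunk_input
  rw [a_eq_pvF raw_text chunk_size hc hw, alt_eq_pvF raw_text chunk_size hc hw]
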